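-- pv_equiv track=rewrite | github.com/daschne8/code-challenges-solutions | Project Euler/Euler26.py | split_match
-- ===== SOURCE A (Python) =====
-- def split_match(the_string, length):
--     the_array = []
--     for i in range(int(len(the_string)/length)):
--         the_array.append(the_string[i*length:i*length+length])
--     for i in the_array:
--         if i != the_array[0] or len(the_array) <= 1:
--             return False
--     return True
-- ===== SOURCE B (Python) =====
-- def split_match(the_string, length):
--     num = int(len(the_string) / length)
--     if num < 1:
--         return True
--     if num == 1:
--         return False
--     return the_string[:num * length] == the_string[:length] * num
-- ===== Notes on version B (the rewrite author's own statement) =====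
-- stated objective: simpler
-- what changed: Replaces the explicit chunk list and the per-chunk comparison loop by a single comparison of the prefix against the first chunk repeated num times (string repetition), after the same num<1 / num==1 guards.
import Mathlib
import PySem

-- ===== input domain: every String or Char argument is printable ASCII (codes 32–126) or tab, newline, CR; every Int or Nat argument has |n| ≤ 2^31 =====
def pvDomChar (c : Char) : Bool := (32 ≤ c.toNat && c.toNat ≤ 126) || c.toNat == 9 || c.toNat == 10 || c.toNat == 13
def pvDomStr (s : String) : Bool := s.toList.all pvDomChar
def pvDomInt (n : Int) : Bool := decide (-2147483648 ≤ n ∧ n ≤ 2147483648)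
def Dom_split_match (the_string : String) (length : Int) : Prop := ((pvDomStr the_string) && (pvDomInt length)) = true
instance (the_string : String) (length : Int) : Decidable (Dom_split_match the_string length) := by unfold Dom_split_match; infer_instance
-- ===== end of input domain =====

-- B replaces A's chunk list and per-chunk loop by one comparison with the first chunk repeated (simpler, same cost).

-- ===== PORT A =====
-- the second loop of A: 'for i in the_array: if i != the_array[0] or len(the_array) <= 1: return False / return True'
-- (the_array[0] is only evaluated when the loop runs, i.e. the_array is nonempty, so headD is exact)
def pvLoopA (arr : List (List Char)) : List (List Char) → Bool
  | [] => true
  | c :: rest => if c ≠ arr.headD [] ∨ arr.length ≤ 1 then false else pvLoopA arr rest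

-- int(len(the_string)/length) is PySem.Int.truncdiv, exact since |len|,|length| < 2^53 on Dom-sized inputs
def split_match (the_string : String) (length : Int) : Bool :=
  let l := the_string.toList
  let the_array := (PySem.List.pyRange 0 (PySem.Int.truncdiv (l.length : Int) length) 1).map
      (fun i => PySem.List.slice l (some (i * length)) (some (i * length + length)))
  pvLoopA the_array the_array

-- ===== PORT B =====
def split_match_alt (the_string : String) (length : Int) : Bool :=
  let l := the_string.toList
  let num := PySem.Int.truncdiv (l.length : Int) length
  if num < 1 then true
  else if num = 1 then false
  else decide (PySem.List.slice l none (some (num * length))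
               = PySem.List.pyRepeat (PySem.List.slice l none (some length)) num)

-- ===== PRECONDITION & SPEC =====
-- Pre_ excludes only length = 0, where A (and B) raise ZeroDivisionError.
def Pre_split_match (the_string : String) (length : Int) : Prop := length ≠ 0
instance (the_string : String) (length : Int) : Decidable (Pre_split_match the_string length) := by unfold Pre_split_match; infer_instance
def pvWitness_split_match : String × Int := ("abab", 2)

def Spec_split_match (the_string : String) (length : Int) (out : Bool) : Prop := out = split_match_alt the_string length
instance (the_string : String) (length : Int) (out : Bool) : Decidable (Spec_split_match the_string length out) := by unfold Spec_split_match; infer_instance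

-- ===== CLAIM (what is proved, stated in full; the proofs are below) =====
def Claim_equal_split_match : Prop := ∀ (the_string : String) (length : Int), Dom_split_match the_string length → Pre_split_match the_string length → Spec_split_match the_string length (split_match the_string length)

-- ===== LEMMAS AND PROOFS =====

-- range(m) as ints
theorem pyRange_zero_nat (m : Nat) :
    PySem.List.pyRange 0 (m : Int) 1 = (List.range m).map Int.ofNat := by
  rcases Nat.eq_zero_or_pos m with rfl | hm
  · simp [PySem.List.pyRange]
  · have h1 : (0:Int) < (m:Int) := by exact_mod_cast hm
    have h2 : (((m:Int) - 0 + 1 - 1) / 1).toNat = m := by omega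
    simp only [PySem.List.pyRange, if_neg one_ne_zero, if_pos h1, h2, if_pos (show (0:Int) < 1 by norm_num)]
    apply List.map_congr_left
    intro j _
    simp

theorem pyRange_nonpos (s : Int) (hs : s ≤ 0) : PySem.List.pyRange 0 s 1 = [] := by
  simp [PySem.List.pyRange, not_lt.mpr hs]

-- A's second loop succeeds iff every element equals the head, provided the array has ≥ 2 elements
theorem pvLoopA_true (arr : List (List Char)) (h2 : 2 ≤ arr.length) :
    ∀ rest, (pvLoopA arr rest = true ↔ ∀ c ∈ rest, c = arr.headD []) := by
  intro rest
  induction rest with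
  | nil => simp [pvLoopA]
  | cons c rest ih =>
    simp only [pvLoopA, List.mem_cons]
    constructor
    · intro h
      by_cases hc : c ≠ arr.headD [] ∨ arr.length ≤ 1
      · rw [if_pos hc] at h; cases h
      · rw [if_neg hc] at h
        rw [not_or, not_ne_iff] at hc
        intro x hx
        rcases hx with rfl | hx
        · exact hc.1
        · exact (ih.mp h) x hx
    · intro h
      rw [if_neg (by rw [not_or, not_ne_iff]; exact ⟨h c (Or.inl rfl), by omega⟩)]
      exact ih.mpr (fun x hx => h x (Or.inr hx))

-- key lemma: prefix equals the first chunk repeated m times ↔ every chunk equals the first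
theorem take_eq_flatten_replicate_iff (l : List Char) (k : Nat) (m : Nat)
    (hmk : m * k ≤ l.length) :
    (l.take (m * k) = (List.replicate m (l.take k)).flatten
      ↔ ∀ j < m, (l.drop (j * k)).take k = l.take k) := by
  induction m with
  | zero => simp
  | succ m ih =>
    have hm : m * k ≤ l.length := le_trans (by nlinarith) hmk
    have hk : k ≤ l.length := le_trans (by nlinarith) hmk
    have hsplit : l.take ((m + 1) * k) = l.take (m * k) ++ (l.drop (m * k)).take k := by
      rw [Nat.succ_mul, List.take_add]
    have hrep : (List.replicate (m + 1) (l.take k)).flatten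
        = (List.replicate m (l.take k)).flatten ++ l.take k := by
      rw [List.replicate_succ', List.flatten_append]; simp
    have hlen1 : (l.take (m * k)).length = m * k := by
      rw [List.length_take]; omega
    have hlen2 : ((List.replicate m (l.take k)).flatten).length = m * k := by
      rw [List.length_flatten]; simp [List.length_take, min_eq_left hk, Nat.mul_comm]
    constructor
    · intro h j hj
      rw [hsplit, hrep] at h
      obtain ⟨h1, h2⟩ := List.append_inj h (by rw [hlen1, hlen2])
      rcases Nat.lt_succ_iff_lt_or_eq.mp hj with hj' | rfl
      · exact (ih hm).mp h1 j hj'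
      · exact h2
    · intro h
      rw [hsplit, hrep]
      have h1 : l.take (m * k) = (List.replicate m (l.take k)).flatten :=
        (ih hm).mpr (fun j hj => h j (Nat.lt_succ_of_lt hj))
      rw [h1, h (m) (Nat.lt_succ_self m)]

-- tdiv of nonnegative by nonpositive is nonpositive
theorem tdiv_nonpos_of_neg (n : Nat) (k : Int) (hk : k < 0) : (n : Int).tdiv k ≤ 0 := by
  have h1 : (n : Int).tdiv k = -((n : Int).tdiv (-k)) := by rw [← Int.tdiv_neg, neg_neg]
  have h2 : 0 ≤ (n : Int).tdiv (-k) :=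
    Int.tdiv_nonneg (by positivity) (by omega)
  omega

theorem main_equiv (l : List Char) (length : Int) (hlen : length ≠ 0) :
    (let the_array := (PySem.List.pyRange 0 (PySem.Int.truncdiv (l.length : Int) length) 1).map
        (fun i => PySem.List.slice l (some (i * length)) (some (i * length + length)))
     pvLoopA the_array the_array) =
    (let num := PySem.Int.truncdiv (l.length : Int) length
     if num < 1 then true
     else if num = 1 then false
     else decide (PySem.List.slice l none (some (num * length))
               = PySem.List.pyRepeat (PySem.List.slice l none (some length)) num)) := by
  simp only []
  rcases lt_or_gt_of_ne hlen with hneg | hpos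
  · -- length < 0: num ≤ 0, A's array is empty, B takes the num < 1 branch
    have hnum : PySem.Int.truncdiv (l.length : Int) length ≤ 0 :=
      tdiv_nonpos_of_neg l.length length hneg
    rw [pyRange_nonpos _ hnum]
    rw [if_pos (by omega)]
    rfl
  · -- length > 0
    obtain ⟨k, rfl⟩ := Int.eq_ofNat_of_zero_le (le_of_lt hpos)
    have hk : 0 < k := by exact_mod_cast hpos
    have hnum : PySem.Int.truncdiv (l.length : Int) (k : Int) = ((l.length / k : Nat) : Int) := rfl
    obtain ⟨m, hmdef⟩ : ∃ m, l.length / k = m := ⟨_, rfl⟩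
    have hmk : m * k ≤ l.length := hmdef ▸ Nat.div_mul_le_self l.length k
    rw [hmdef] at hnum
    rw [hnum, pyRange_zero_nat]
    have harr : ((List.range m).map Int.ofNat).map
        (fun i => PySem.List.slice l (some (i * (k : Int))) (some (i * (k : Int) + (k : Int))))
        = (List.range m).map (fun j => (l.drop (j * k)).take k) := by
      rw [List.map_map]
      apply List.map_congr_left
      intro j _
      show PySem.List.slice l (some ((j : Int) * (k : Int))) (some ((j : Int) * (k : Int) + (k : Int)))
          = (l.drop (j * k)).take k
      have hcast : ((j : Int) * (k : Int)) = ((j * k : Nat) : Int) := by push_cast; ring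
      rw [hcast, PySem.List.slice_natCast_add]
    rw [harr]
    rcases Nat.lt_or_ge m 2 with hm2 | hm2
    · interval_cases m
      · simp [pvLoopA]
      · -- m = 1: array is a singleton, loop returns False
        simp only [List.range_one, List.map_cons, List.map_nil]
        rw [if_neg (by norm_num), if_pos (by norm_num)]
        simp [pvLoopA]
    · -- m ≥ 2
      rw [if_neg (by exact_mod_cast by omega), if_neg (by exact_mod_cast by omega)]
      have hnumk : ((m : Int) * (k : Int)) = ((m * k : Nat) : Int) := by push_cast; ring
      rw [hnumk, PySem.List.slice_to_natCast]
      have hrep : PySem.List.pyRepeat (PySem.List.slice l none (some ((k : Nat) : Int))) (m : Int)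
          = (List.replicate m (l.take k)).flatten := by
        rw [PySem.List.slice_to_natCast]
        simp [PySem.List.pyRepeat]
      rw [hrep]
      have hhead : ((List.range m).map (fun j => (l.drop (j * k)).take k)).headD [] = l.take k := by
        obtain ⟨m', rfl⟩ : ∃ m', m = m' + 1 := ⟨m - 1, by omega⟩
        rw [List.range_succ_eq_map]
        simp
      rw [Bool.eq_iff_iff]
      rw [pvLoopA_true _ (by simp; omega), hhead]
      rw [decide_eq_true_iff]
      rw [take_eq_flatten_replicate_iff l k m hmk]
      constructor
      · intro h j hj
        exact h _ (List.mem_map_of_mem (List.mem_range.mpr hj))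
      · intro h c hc
        obtain ⟨j, hj, rfl⟩ := List.mem_map.mp hc
        exact h j (List.mem_range.mp hj)

-- ===== VERDICT (by name: the statement is the Claim_ definition above) =====
theorem split_match_spec : Claim_equal_split_match := by
  intro the_string length _ hpre
  unfold Spec_split_match split_match split_match_alt
  exact main_equiv the_string.toList length hpre
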